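-- pv_equiv track=rewrite | github.com/nikeethr/rflexstudygroup | xinweic/HackerRank/Encryption.py | solve
-- ===== SOURCE A (Python) =====
-- def solve(L):
--     """
--     (string) -> string
--
--     Given a string as input, forms a grid with minimum area.
--     Returns the grid as a space separated string, column first.
--     """
--     n = len(L)
--
--     lower_bound, upper_bound = None, None
--     for x in range(1, n+1):
--         if x * x < n:
--             lower_bound = x
--             upper_bound = x + 1
--         elif x * x == n:
--             lower_bound = x
--             upper_bound = x
--
--     min_area, best_row, best_col = None, None, None
--     for row in range(lower_bound, upper_bound + 1):
--         for col in range(row, upper_bound + 1):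
--             area = row * col
--             if area >= n and (not min_area or area < min_area):
--                 min_area = area
--                 best_row, best_col = row, col
--
--     assert min_area is not None, "Did not find a viable answer."
--
--     result = []
--     for col in range(best_col):
--         column_string = ''
--         for index in range(col, n, best_col):
--             column_string += L[index]
--         result.append(column_string)
--
--     return ' '.join(result)
-- ===== SOURCE B (Python) =====
-- def solve(L):
--     """
--     (string) -> string
--
--     Same grid reading, computed directly: the side of the minimal grid is the
--     smallest c with c*c >= len(L); fill columns in one row-major sweep.
--     """
--     n = len(L)
--     c = 1
--     while c * c < n:
--         c += 1
--     cols = [''] * c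
--     for i in range(0, n, c):
--         for j, ch in enumerate(L[i:i + c]):
--             cols[j] += ch
--     return ' '.join(cols)
-- ===== Notes on version B (the rewrite author's own statement) =====
-- stated objective: simpler
-- what changed: B replaces A's linear bound-finding scan plus nested minimal-area search by the smallest c with c*c >= n found with one tight while loop, and fills all columns in a single row-major sweep over the string instead of one index-stepping pass per column.
-- crash fix: On the empty string A raises TypeError (its bound-finding loop never runs, leaving None bounds); B returns the empty string. — e.g. on solve(""): A raises TypeError, B returns ""
import Mathlib
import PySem

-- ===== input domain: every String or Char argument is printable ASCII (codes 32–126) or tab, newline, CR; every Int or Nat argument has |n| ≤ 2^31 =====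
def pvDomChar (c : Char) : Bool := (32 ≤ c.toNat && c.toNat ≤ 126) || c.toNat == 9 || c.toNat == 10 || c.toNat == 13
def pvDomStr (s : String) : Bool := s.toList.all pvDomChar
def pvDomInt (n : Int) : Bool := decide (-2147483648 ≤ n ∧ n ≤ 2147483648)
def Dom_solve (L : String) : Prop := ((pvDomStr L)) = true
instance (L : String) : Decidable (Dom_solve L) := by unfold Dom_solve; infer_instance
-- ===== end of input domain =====

-- B replaces A's bound-finding scan and nested minimal-area search by the smallest c with c*c ≥ n,
-- and fills the columns in one row-major sweep instead of one index-stepping pass per column (objective: simpler).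

-- ===== PORT A =====
-- first loop of A: find lower/upper bounds for the square side
def solveBounds (n : Int) : Option Int × Option Int :=
  (PySem.List.pyRange 1 (n + 1)).foldl
    (fun st x =>
      if x * x < n then (some x, some (x + 1))
      else if x * x = n then (some x, some x)
      else st)
    (none, none)

-- second loop of A: nested minimal-area search
def solveSearch (n lb ub : Int) : Option Int × Option Int × Option Int :=
  (PySem.List.pyRange lb (ub + 1)).foldl
    (fun st row =>
      (PySem.List.pyRange row (ub + 1)).foldl
        (fun (st : Option Int × Option Int × Option Int) col =>
          let area := row * col
          if (decide (area ≥ n) &&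
              (match st.1 with
               | none => true
               | some m => (m == 0) || decide (area < m))) then
            (some area, some row, some col)
          else st)
        st)
    (none, none, none)

-- third loop of A: build one column string per column index
def solveBuild (cs : List Char) (n bestCol : Int) : List String :=
  (PySem.List.pyRange 0 bestCol).foldl
    (fun res col =>
      let colStr := (PySem.List.pyRange col n bestCol).foldl
        (fun acc idx => acc ++ [PySem.List.pyGetD cs idx ' ']) ([] : List Char)
      res ++ [String.ofList colStr])
    []

-- Python raises TypeError when the bounds are still None (n = 0); Pre_solve excludes that; '.getD 0' stands for that never-taken raise
def solve (L : String) : String :=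
  PySem.Str.join " "
    (solveBuild L.toList L.toList.length
      ((solveSearch L.toList.length
          ((solveBounds L.toList.length).1.getD 0)
          ((solveBounds L.toList.length).2.getD 0)).2.2.getD 0))

-- ===== PORT B =====
-- B's while loop: smallest c ≥ 1 with c*c ≥ n (the '1 ≤ c' in the guard only makes the recursion total;
-- the function is always called with c = 1 and the guard is preserved, exactly as in the Python)
def solveAltCols (n c : Int) : Int :=
  if h : 1 ≤ c ∧ c * c < n then solveAltCols n (c + 1) else c
termination_by (n - c).toNat
decreasing_by
  have hc : c ≤ c * c := le_mul_of_one_le_left (by omega) h.1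
  have : c < n := lt_of_le_of_lt hc h.2
  omega

-- B's row-major sweep: for i in range(0, n, c): for j, ch in enumerate(L[i:i+c]): cols[j] += ch
def solveAltFill (cs : List Char) (n c : Int) : List (List Char) :=
  (PySem.List.pyRange 0 n c).foldl
    (fun cols i =>
      (PySem.List.enumerate (PySem.List.slice cs (some i) (some (i + c)))).foldl
        (fun (cols : List (List Char)) jch =>
          cols.set jch.1.toNat (cols.getD jch.1.toNat [] ++ [jch.2]))
        cols)
    (List.replicate c.toNat [])

def solve_alt (L : String) : String :=
  PySem.Str.join " "
    ((solveAltFill L.toList L.toList.length (solveAltCols L.toList.length 1)).map String.ofList)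

-- ===== PRECONDITION & SPEC =====
-- Pre_solve excludes only the empty string, on which A raises TypeError (its bounds stay None).
def Pre_solve (L : String) : Prop := L ≠ ""
instance (L : String) : Decidable (Pre_solve L) := by unfold Pre_solve; infer_instance
def pvWitness_solve : String := "haveanicedayok"

-- On the empty string A raises TypeError (the bound-finding loop never runs, leaving None bounds); B returns "".
def Raises_solve (L : String) : Prop := L = ""
instance (L : String) : Decidable (Raises_solve L) := by unfold Raises_solve; infer_instance
def pvRaiseWitness_solve : String := ""
def pvRaiseWitnessOut_solve : String := ""

def Spec_solve (L : String) (out : String) : Prop := out = solve_alt L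
instance (L : String) (out : String) : Decidable (Spec_solve L out) := by unfold Spec_solve; infer_instance

-- ===== CLAIM (what is proved, stated in full; the proofs are below) =====
def Claim_equal_solve : Prop := ∀ (L : String), Dom_solve L → Pre_solve L → Spec_solve L (solve L)
def Claim_raises_solve : Prop :=
  (∀ (L : String), Dom_solve L → Raises_solve L → ¬ Pre_solve L) ∧
  (Dom_solve (pvRaiseWitness_solve) ∧ Raises_solve (pvRaiseWitness_solve) ∧
    solve_alt (pvRaiseWitness_solve) = pvRaiseWitnessOut_solve)

-- ===== LEMMAS AND PROOFS =====

lemma foldl_id_of_mem {α β : Type} (l : List α) (f : β → α → β) (st : β)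
    (h : ∀ x ∈ l, ∀ acc, f acc x = acc) : l.foldl f st = st := by
  induction l generalizing st with
  | nil => rfl
  | cons x xs ih =>
    simp only [List.foldl_cons, h x (by simp)]
    exact ih st (fun y hy acc => h y (List.mem_cons_of_mem _ hy) acc)

lemma pyRange_pos_nil {a b s : Int} (hs : 0 < s) (hab : b ≤ a) :
    PySem.List.pyRange a b s = [] := by
  rw [PySem.List.pyRange_of_pos a b hs, if_neg (by omega)]
  simp

lemma pyRange_pos_cons {a b s : Int} (hs : 0 < s) (hab : a < b) :
    PySem.List.pyRange a b s = a :: PySem.List.pyRange (a + s) b s := by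
  rw [PySem.List.pyRange_of_pos a b hs, PySem.List.pyRange_of_pos (a+s) b hs]
  rw [if_pos hab]
  by_cases h2 : a + s < b
  · rw [if_pos h2]
    have hcount : ((b - a + s - 1) / s).toNat = ((b - (a+s) + s - 1) / s).toNat + 1 := by
      have h3 : b - a + s - 1 = (b - (a+s) + s - 1) + 1 * s := by ring
      rw [h3, Int.add_mul_ediv_right _ _ (by omega : s ≠ 0)]
      have h0 : 0 ≤ (b - (a+s) + s - 1) / s := by
        apply Int.ediv_nonneg <;> omega
      omega
    rw [hcount, List.range_succ_eq_map]
    simp only [List.map_cons, List.map_map, Nat.cast_zero, mul_zero, add_zero]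
    congr 1
    exact List.map_congr_left fun x _ => by simp [Function.comp]; ring
  · rw [if_neg h2]
    have hcount : ((b - a + s - 1) / s).toNat = 1 := by
      have h1 : (b - a + s - 1) / s = 1 := by
        rw [← PySem.Int.floordiv_eq_ediv_of_pos hs, PySem.Int.floordiv_eq_iff_of_pos hs]
        constructor <;> omega
      omega
    rw [hcount]
    simp

def everyK (K : Nat) (xs : List Char) : List Char :=
  match xs with
  | [] => []
  | y :: ys => y :: everyK K (ys.drop (K - 1))
termination_by xs.length
decreasing_by simp

lemma everyK_drop (K : Nat) (hK : 1 ≤ K) (cs : List Char) (i : Nat) (hi : i < cs.length) :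
    everyK K (cs.drop i) = cs[i] :: everyK K (cs.drop (i + K)) := by
  rw [← List.getElem_cons_drop hi, everyK]
  simp only [List.drop_drop]
  have h2 : i + 1 + (K - 1) = i + K := by omega
  rw [h2]

lemma bounds_eq (n : Nat) (hn : 1 ≤ n) :
    solveBounds n =
      (some (Nat.sqrt n : Int),
       some (if Nat.sqrt n * Nat.sqrt n = n then (Nat.sqrt n : Int) else (Nat.sqrt n : Int) + 1)) := by
  unfold solveBounds
  set s := Nat.sqrt n with hs
  have hs1 : 1 ≤ s := Nat.sqrt_pos.mpr (by omega)
  have hs2 : s ≤ n := Nat.sqrt_le_self n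
  have hle : s * s ≤ n := by have := Nat.sqrt_le' n; nlinarith
  have hlt : n < (s + 1) * (s + 1) := by have := Nat.lt_succ_sqrt' n; nlinarith [this]
  rw [PySem.List.pyRange_one_append 1 ((s : Int) + 1) ((n : Int) + 1) (by omega) (by omega)]
  rw [List.foldl_append]
  rw [foldl_id_of_mem]
  · rw [show ((s : Int) + 1) = (s : Int) + 1 from rfl,
      PySem.List.pyRange_one_succ_right (by omega : (1:Int) ≤ (s:Int)), List.foldl_append]
    simp only [List.foldl_cons, List.foldl_nil]
    by_cases he : s * s = n
    · have : ¬ ((s : Int) * s < n) := by push_cast [← he]; omega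
      rw [if_neg this, if_pos (by exact_mod_cast he), if_pos he]
    · have h1 : (s : Int) * s < n := by
        have : s * s < n := lt_of_le_of_ne hle he
        exact_mod_cast this
      rw [if_pos h1, if_neg he]
  · intro x hx acc
    rw [PySem.List.mem_pyRange_one] at hx
    have hxx : (n : Int) < x * x := by
      have h1 : ((s:Int)+1) * ((s:Int)+1) ≤ x * x := by nlinarith [hx.1]
      have h2 : (n : Int) < ((s:Int)+1) * ((s:Int)+1) := by exact_mod_cast hlt
      omega
    rw [if_neg (by omega), if_neg (by omega)]

lemma search_eq (n : Nat) (hn : 1 ≤ n) :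
    (solveSearch n (Nat.sqrt n : Int)
      (if Nat.sqrt n * Nat.sqrt n = n then (Nat.sqrt n : Int) else (Nat.sqrt n : Int) + 1)).2.2 =
      some (if Nat.sqrt n * Nat.sqrt n = n then (Nat.sqrt n : Int) else (Nat.sqrt n : Int) + 1) := by
  unfold solveSearch
  set s := Nat.sqrt n with hs
  have hs1 : 1 ≤ s := Nat.sqrt_pos.mpr (by omega)
  have hle : s * s ≤ n := by have := Nat.sqrt_le' n; nlinarith
  have hlt : n < (s + 1) * (s + 1) := by have := Nat.lt_succ_sqrt' n; nlinarith [this]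
  by_cases he : s * s = n
  · rw [if_pos he]
    rw [PySem.List.pyRange_one_singleton]
    simp only [List.foldl_cons, List.foldl_nil]
    rw [PySem.List.pyRange_one_singleton]
    simp only [List.foldl_cons, List.foldl_nil]
    have h1 : ((s:Int) * s ≥ (n:Int)) := by exact_mod_cast he.ge
    simp [h1]
  · rw [if_neg he]
    have hr1 : PySem.List.pyRange (s:Int) ((s:Int) + 1 + 1) = [(s:Int), (s:Int)+1] := by
      rw [PySem.List.pyRange_one_cons (by omega), PySem.List.pyRange_one_cons (by omega),
        PySem.List.pyRange_one_eq_nil (by omega)]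
    have hr2 : PySem.List.pyRange ((s:Int)+1) ((s:Int) + 1 + 1) = [(s:Int)+1] := by
      rw [PySem.List.pyRange_one_cons (by omega), PySem.List.pyRange_one_eq_nil (by omega)]
    rw [hr1]
    simp only [List.foldl_cons, List.foldl_nil]
    rw [hr1, hr2]
    simp only [List.foldl_cons, List.foldl_nil]
    have hslt : s * s < n := lt_of_le_of_ne hle he
    have c1 : ¬ ((n:Int) ≤ (s:Int) * (s:Int)) := by exact_mod_cast not_le.mpr hslt
    have c3 : ((n:Int) ≤ ((s:Int)+1) * ((s:Int)+1)) := by exact_mod_cast hlt.le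
    have hnz : ((s:Int) * ((s:Int)+1) : Int) ≠ 0 := by nlinarith
    by_cases hmid : ((n:Int) ≤ (s:Int) * ((s:Int)+1))
    · simp [c1, hmid, hnz]
    · simp [c1, hmid, c3]

lemma altCols_ge (n : Nat) (k : Int) (hk1 : 1 ≤ k)
    (hbig : (n : Int) ≤ k * k) (hsmall : ∀ x : Int, 1 ≤ x → x < k → x * x < n) :
    ∀ (fuel : Nat) (c : Int), 1 ≤ c → c ≤ k → (k - c).toNat ≤ fuel → solveAltCols n c = k := by
  intro fuel
  induction fuel with
  | zero =>
    intro c hc1 hck hf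
    have : c = k := by omega
    subst this
    rw [solveAltCols]
    rw [dif_neg (by push_neg; intro _; omega)]
  | succ m ih =>
    intro c hc1 hck hf
    rw [solveAltCols]
    by_cases h : c * c < (n : Int)
    · rw [dif_pos ⟨hc1, h⟩]
      have hck' : c < k := by
        by_contra hge
        push_neg at hge
        have : k * k ≤ c * c := by nlinarith
        omega
      exact ih (c + 1) (by omega) (by omega) (by omega)
    · rw [dif_neg (by push_neg; intro _; omega)]
      by_contra hne
      have : c < k := by omega
      exact h (hsmall c hc1 this)

lemma altCols_eq (n : Nat) (hn : 1 ≤ n) :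
    solveAltCols n 1 =
      (if Nat.sqrt n * Nat.sqrt n = n then (Nat.sqrt n : Int) else (Nat.sqrt n : Int) + 1) := by
  set s := Nat.sqrt n with hs
  have hs1 : 1 ≤ s := Nat.sqrt_pos.mpr (by omega)
  have hle : s * s ≤ n := by have := Nat.sqrt_le' n; nlinarith
  have hlt : n < (s + 1) * (s + 1) := by have := Nat.lt_succ_sqrt' n; nlinarith [this]
  set k : Int := (if s * s = n then (s : Int) else (s : Int) + 1) with hkdef
  have hk1 : 1 ≤ k := by rw [hkdef]; split <;> omega
  have hbig : (n : Int) ≤ k * k := by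
    rw [hkdef]; split
    · rename_i h; exact_mod_cast (le_of_eq h.symm)
    · exact_mod_cast hlt.le
  have hsmall : ∀ x : Int, 1 ≤ x → x < k → x * x < n := by
    intro x hx1 hxk
    have hxs : x ≤ (s : Int) := by
      rw [hkdef] at hxk; split at hxk <;> omega
    have h1 : x * x ≤ (s : Int) * (s : Int) := by nlinarith
    rw [hkdef] at hxk
    split at hxk
    · rename_i h
      have : x * x < (s:Int) * (s:Int) := by nlinarith
      have h2 : ((s:Int) * (s:Int)) = (n:Int) := by exact_mod_cast h
      omega
    · rename_i h
      have h2 : (s:Int) * (s:Int) < (n:Int) := by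
        have : s * s < n := lt_of_le_of_ne hle h
        exact_mod_cast this
      omega
  exact altCols_ge n k hk1 hbig hsmall (k - 1).toNat 1 (by omega) hk1 (by omega)

lemma acol_eq (cs : List Char) (k : Int) (hk : 0 < k) :
    ∀ (fuel : Nat) (c : Int), 0 ≤ c → cs.length - c.toNat ≤ fuel →
      (PySem.List.pyRange c cs.length k).map (fun i => PySem.List.pyGetD cs i ' ') =
        everyK k.toNat (cs.drop c.toNat) := by
  intro fuel
  induction fuel with
  | zero =>
    intro c hc hf
    have hge : (cs.length : Int) ≤ c := by omega
    rw [pyRange_pos_nil hk hge, List.drop_of_length_le (by omega)]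
    simp [everyK.eq_def]
  | succ m ih =>
    intro c hc hf
    by_cases hlt : c < (cs.length : Int)
    · rw [pyRange_pos_cons hk hlt, List.map_cons]
      have hcn : c.toNat < cs.length := by omega
      rw [PySem.List.pyGetD_eq_getElem cs ' ' hc (by omega)]
      rw [everyK_drop k.toNat (by omega) cs c.toNat hcn]
      congr 1
      have h1 : (c + k).toNat = c.toNat + k.toNat := by omega
      rw [← h1]
      exact ih (c + k) (by omega) (by omega)
    · rw [pyRange_pos_nil hk (by omega), List.drop_of_length_le (by omega)]
      simp [everyK.eq_def]

lemma build_eq (cs : List Char) (k : Int) (hk : 0 < k) :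
    solveBuild cs cs.length k =
      (List.range k.toNat).map (fun j => String.ofList (everyK k.toNat (cs.drop j))) := by
  unfold solveBuild
  lift k to ℕ using hk.le with K
  have hK : 0 < K := by exact_mod_cast hk
  rw [PySem.List.foldl_append_singleton_eq_map
    (fun col => String.ofList ((PySem.List.pyRange col cs.length (K : Int)).foldl
      (fun acc idx => acc ++ [PySem.List.pyGetD cs idx ' ']) ([] : List Char)))]
  rw [List.nil_append]
  rw [PySem.List.pyRange_zero_nat, List.map_map]
  apply List.map_congr_left
  intro j _
  simp only [Function.comp_apply]
  rw [PySem.List.foldl_append_singleton_eq_map (fun i => PySem.List.pyGetD cs i ' ')]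
  rw [List.nil_append]
  rw [acol_eq cs (K : Int) hk cs.length (j : Int) (by omega) (by omega)]
  simp

lemma inner_fill (K : Nat) :
    ∀ (chunk : List Char) (m : Int) (cols : List (List Char)), 0 ≤ m →
      cols.length = K → m.toNat + chunk.length ≤ K →
      ((PySem.List.enumerate chunk m).foldl
        (fun (cols : List (List Char)) jch =>
          cols.set jch.1.toNat (cols.getD jch.1.toNat [] ++ [jch.2])) cols).length = K ∧
      ∀ j : Nat,
        ((PySem.List.enumerate chunk m).foldl
          (fun (cols : List (List Char)) jch =>
            cols.set jch.1.toNat (cols.getD jch.1.toNat [] ++ [jch.2])) cols).getD j [] =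
        cols.getD j [] ++
          (if m.toNat ≤ j ∧ j < m.toNat + chunk.length then [chunk.getD (j - m.toNat) ' '] else []) := by
  intro chunk
  induction chunk with
  | nil =>
    intro m cols hm hlen hb
    refine ⟨by simpa [PySem.List.enumerate] using hlen, fun j => ?_⟩
    simp [PySem.List.enumerate]
  | cons ch rest ih =>
    intro m cols hm hlen hb
    rw [PySem.List.enumerate_cons, List.foldl_cons]
    have hlc : (ch :: rest).length = rest.length + 1 := by simp
    simp only [List.length_cons] at hb
    have hmK : m.toNat < K := by omega
    set cols1 := cols.set m.toNat (cols.getD m.toNat [] ++ [ch]) with hc1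
    have hlen1 : cols1.length = K := by rw [hc1, List.length_set]; exact hlen
    obtain ⟨hL, hG⟩ := ih (m + 1) cols1 (by omega) hlen1 (by omega)
    refine ⟨hL, fun j => ?_⟩
    rw [hG j]
    have hm1 : (m + 1).toNat = m.toNat + 1 := by omega
    by_cases hj : j = m.toNat
    · subst hj
      have hset : cols1.getD m.toNat [] = cols.getD m.toNat [] ++ [ch] := by
        rw [hc1, List.getD_eq_getElem?_getD, List.getElem?_set_self (by omega)]
        rfl
      rw [hset, if_neg (by rw [hm1]; omega), if_pos (by rw [hlc]; omega)]
      simp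
    · have hset : cols1.getD j [] = cols.getD j [] := by
        rw [hc1, List.getD_eq_getElem?_getD, List.getElem?_set_ne (by omega),
          ← List.getD_eq_getElem?_getD]
      rw [hset]
      by_cases hin : m.toNat + 1 ≤ j ∧ j < m.toNat + 1 + rest.length
      · rw [if_pos (by rw [hm1]; omega), if_pos (by rw [hlc]; omega)]
        have ht : j - m.toNat = (j - (m + 1).toNat) + 1 := by rw [hm1]; omega
        rw [ht, List.getD_cons_succ, hm1]
      · rw [if_neg (by rw [hm1]; omega), if_neg (by rw [hlc]; omega)]

lemma outer_fill (cs : List Char) (K : Nat) (hK : 0 < K) :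
    ∀ (fuel : Nat) (i : Int) (cols : List (List Char)), 0 ≤ i →
      cols.length = K → cs.length - i.toNat ≤ fuel →
      ((PySem.List.pyRange i cs.length (K : Int)).foldl
        (fun cols i' =>
          (PySem.List.enumerate (PySem.List.slice cs (some i') (some (i' + (K : Int))))).foldl
            (fun (cols : List (List Char)) jch =>
              cols.set jch.1.toNat (cols.getD jch.1.toNat [] ++ [jch.2])) cols) cols).length = K ∧
      ∀ j : Nat, j < K →
        ((PySem.List.pyRange i cs.length (K : Int)).foldl
          (fun cols i' =>
            (PySem.List.enumerate (PySem.List.slice cs (some i') (some (i' + (K : Int))))).foldl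
              (fun (cols : List (List Char)) jch =>
                cols.set jch.1.toNat (cols.getD jch.1.toNat [] ++ [jch.2])) cols) cols).getD j [] =
        cols.getD j [] ++ everyK K ((cs.drop i.toNat).drop j) := by
  intro fuel
  induction fuel with
  | zero =>
    intro i cols hi hlen hf
    rw [pyRange_pos_nil (by exact_mod_cast hK) (by omega)]
    refine ⟨hlen, fun j hj => ?_⟩
    rw [List.drop_of_length_le (l := cs) (by omega), List.drop_nil]
    simp [everyK.eq_def]
  | succ m ih =>
    intro i cols hi hlen hf
    by_cases hlt : i < (cs.length : Int)
    · rw [pyRange_pos_cons (by exact_mod_cast hK) hlt, List.foldl_cons]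
      have hchunk : PySem.List.slice cs (some i) (some (i + (K : Int))) =
          (cs.drop i.toNat).take K := by
        rw [PySem.List.slice_toNat cs hi (by omega)]
        congr 1
        omega
      have hclen : (PySem.List.slice cs (some i) (some (i + (K : Int)))).length ≤ K := by
        rw [hchunk]; simp
      obtain ⟨hL1, hG1⟩ := inner_fill K (PySem.List.slice cs (some i) (some (i + (K : Int))))
        0 cols (le_refl 0) hlen (by simpa using hclen)
      obtain ⟨hL2, hG2⟩ := ih (i + (K : Int)) _ (by omega) hL1 (by omega)
      refine ⟨hL2, fun j hj => ?_⟩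
      rw [hG2 j hj, hG1 j]
      rw [List.append_assoc]
      congr 1
      simp only [Int.toNat_zero, Nat.zero_le, true_and, Nat.sub_zero, hchunk, zero_add]
      have hik : (i + (K : Int)).toNat = i.toNat + K := by omega
      rw [hik]
      set r := cs.drop i.toNat with hr
      have hrlen : r.length = cs.length - i.toNat := by rw [hr]; simp
      by_cases hjr : j < r.length
      · have hjc : j < ((r.take K).length) := by simp; omega
        rw [if_pos (by simpa using hjc)]
        have hgd : (r.take K).getD j ' ' = r[j] := by
          rw [List.getD_eq_getElem?_getD, List.getElem?_take_of_lt hj,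
            List.getElem?_eq_getElem hjr]
          rfl
        rw [hgd, everyK_drop K (by omega) r j hjr]
        have hdd : r.drop (j + K) = (cs.drop (i.toNat + K)).drop j := by
          rw [hr, List.drop_drop, List.drop_drop]
          congr 1
          omega
        rw [hdd]
        rfl
      · have h1 : r.drop j = [] := List.drop_of_length_le (by omega)
        have h2 : (List.drop (i.toNat + K) cs).drop j = [] :=
          List.drop_of_length_le (by simp; omega)
        rw [if_neg (by simp only [List.length_take]; omega), h1, h2, List.nil_append]
    · rw [pyRange_pos_nil (by exact_mod_cast hK) (by omega)]
      refine ⟨hlen, fun j hj => ?_⟩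
      rw [List.drop_of_length_le (l := cs) (by omega), List.drop_nil]
      simp [everyK.eq_def]

lemma fill_eq (cs : List Char) (k : Int) (hk : 0 < k) :
    solveAltFill cs cs.length k = (List.range k.toNat).map (fun j => everyK k.toNat (cs.drop j)) := by
  unfold solveAltFill
  lift k to ℕ using hk.le with K
  have hK : 0 < K := by exact_mod_cast hk
  simp only [Int.toNat_natCast]
  obtain ⟨hL, hG⟩ := outer_fill cs K hK cs.length 0 (List.replicate K []) (le_refl 0)
    (by simp) (by simp)
  apply List.ext_getElem
  · rw [hL]; simp
  · intro j h1 h2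
    have hjK : j < K := by rw [hL] at h1; exact h1
    have hgd : (((PySem.List.pyRange 0 cs.length (K : Int)).foldl _ (List.replicate K [])).getD j []) = _ := hG j hjK
    rw [List.getD_eq_getElem?_getD, List.getElem?_eq_getElem h1] at hgd
    simp only [Option.getD_some] at hgd
    rw [hgd]
    simp

-- ===== VERDICT (by name: the statement is the Claim_ definition above) =====
theorem solve_spec : Claim_equal_solve := by
  intro L _ hpre
  unfold Spec_solve solve solve_alt
  have hne : L.toList ≠ [] := by
    simpa [String.toList_eq_nil_iff] using hpre
  have hn : 1 ≤ L.toList.length := by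
    cases h : L.toList with
    | nil => exact absurd h hne
    | cons a t => simp
  set n : Nat := L.toList.length with hdefn
  have hk : 0 < (if Nat.sqrt n * Nat.sqrt n = n then (Nat.sqrt n : Int) else (Nat.sqrt n : Int) + 1) := by
    have := Nat.sqrt_pos.mpr (by omega : 0 < n)
    split <;> omega
  rw [bounds_eq n hn]
  simp only [Option.getD_some]
  rw [search_eq n hn]
  simp only [Option.getD_some]
  rw [altCols_eq n hn]
  rw [build_eq L.toList _ hk, fill_eq L.toList _ hk]
  simp [Function.comp_def]

@[simp] theorem solve_raises : Claim_raises_solve := by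
  unfold Claim_raises_solve
  refine ⟨fun L _ h hp => hp h, by decide, by decide, ?_⟩
  have h1 : solveAltCols (0 : Int) 1 = 1 := by
    rw [solveAltCols]
    norm_num
  show solve_alt "" = ""
  unfold solve_alt
  rw [show ("" : String).toList = [] from rfl]
  simp only [List.length_nil, Nat.cast_zero, h1]
  rfl
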